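-- pv_equiv track=rewrite | github.com/sunghyuny/RAG_Practice | ocr/table_block_extractor.py | group_structured_blocks
-- ===== SOURCE A (Python) =====
-- def group_structured_blocks(structured_indices: list[int], gap: int = 2) -> list[list[int]]:
--     blocks: list[list[int]] = []
--     current: list[int] = []
--     for idx in structured_indices:
--         if not current or idx <= current[-1] + gap:
--             current.append(idx)
--         else:
--             blocks.append(current)
--             current = [idx]
--     if current:
--         blocks.append(current)
--     return blocks
-- ===== SOURCE B (Python) =====
-- def group_structured_blocks(structured_indices: list[int], gap: int = 2) -> list[list[int]]:
--     # Backward pass: build the groups back-to-front (each group kept reversed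
--     # for O(1) appends), then undo both reversals at the end.
--     out_rev: list[list[int]] = []   # groups in reverse order, each group reversed
--     nxt = None                      # the element to the right of x in the original order
--     for x in reversed(structured_indices):
--         if nxt is not None and nxt <= x + gap:
--             out_rev[-1].append(x)
--         else:
--             out_rev.append([x])
--         nxt = x
--     return [g[::-1] for g in reversed(out_rev)]
-- ===== Notes on version B (the rewrite author's own statement) =====
-- stated objective: alternative
-- what changed: Replaces A's forward accumulate-and-flush loop (current buffer appended to blocks when a gap is found) with a single backward pass that builds the output back-to-front, extending or starting the rearmost group, and reverses at the end.
import Mathlib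
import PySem

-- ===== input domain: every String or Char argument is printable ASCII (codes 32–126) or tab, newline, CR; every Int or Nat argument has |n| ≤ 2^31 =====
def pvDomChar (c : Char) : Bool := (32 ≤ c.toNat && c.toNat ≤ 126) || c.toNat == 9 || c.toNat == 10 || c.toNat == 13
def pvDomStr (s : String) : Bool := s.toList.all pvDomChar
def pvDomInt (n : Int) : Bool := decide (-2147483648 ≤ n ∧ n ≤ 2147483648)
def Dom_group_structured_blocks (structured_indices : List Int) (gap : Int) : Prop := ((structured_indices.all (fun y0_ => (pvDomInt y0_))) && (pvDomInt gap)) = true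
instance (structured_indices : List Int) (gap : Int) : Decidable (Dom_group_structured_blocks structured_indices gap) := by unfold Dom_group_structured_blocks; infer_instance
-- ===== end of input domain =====

-- B replaces A's forward accumulate-and-flush loop with a backward pass building the output back-to-front (objective: alternative decomposition, same cost).


-- ===== PORT A =====
-- state: (blocks, current); current[-1] via PySem.List.pyGet?; final 'if current: blocks.append(current)'
def group_structured_blocks (structured_indices : List Int) (gap : Int) : List (List Int) :=
  let st := structured_indices.foldl
    (fun (s : List (List Int) × List Int) idx =>
      if s.2 = [] ∨ idx ≤ (PySem.List.pyGet? s.2 (-1)).getD 0 + gap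
      then (s.1, s.2 ++ [idx])
      else (s.1 ++ [s.2], [idx]))
    ([], [])
  if st.2 = [] then st.1 else st.1 ++ [st.2]

-- ===== PORT B =====
-- one iteration of Source B's backward loop; state: (out_rev, nxt); out_rev[-1] via pyGet? (-1)
def pvStepB (gap : Int) (s : List (List Int) × Option Int) (x : Int) : List (List Int) × Option Int :=
  match s.2 with
  | some nxt =>
    if nxt ≤ x + gap then
      (s.1.dropLast ++ [((PySem.List.pyGet? s.1 (-1)).getD []) ++ [x]], some x)
    else (s.1 ++ [[x]], some x)
  | none => (s.1 ++ [[x]], some x)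

def group_structured_blocks_alt (structured_indices : List Int) (gap : Int) : List (List Int) :=
  let st := structured_indices.reverse.foldl (pvStepB gap) ([], none)
  -- [g[::-1] for g in reversed(out_rev)]
  (st.1.reverse).map (fun g => g.reverse)

-- ===== PRECONDITION & SPEC =====
def Spec_group_structured_blocks (structured_indices : List Int) (gap : Int) (out : List (List Int)) : Prop := out = group_structured_blocks_alt structured_indices gap
instance (structured_indices : List Int) (gap : Int) (out : List (List Int)) : Decidable (Spec_group_structured_blocks structured_indices gap out) := by unfold Spec_group_structured_blocks; infer_instance

-- ===== CLAIM (what is proved, stated in full; the proofs are below) =====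
def Claim_equal_group_structured_blocks : Prop := ∀ (structured_indices : List Int) (gap : Int), Dom_group_structured_blocks structured_indices gap → Spec_group_structured_blocks structured_indices gap (group_structured_blocks structured_indices gap)

-- ===== LEMMAS AND PROOFS =====

-- reference: right-to-left recursion producing the grouping
def pvRef (gap : Int) : List Int → List (List Int)
  | [] => []
  | x :: t =>
    match t with
    | [] => [[x]]
    | y :: u =>
      if y ≤ x + gap then
        match pvRef gap (y :: u) with
        | g :: r => (x :: g) :: r
        | [] => [[x]]
      else [x] :: pvRef gap (y :: u)

theorem pvRef_ne_nil (gap a : Int) (b : List Int) : pvRef gap (a :: b) ≠ [] := by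
  cases b with
  | nil => simp [pvRef]
  | cons y u =>
    simp only [pvRef]
    split
    · split <;> simp
    · simp

-- ===== B side =====
theorem pvB_invariant (gap : Int) (t : List Int) :
    t.reverse.foldl (pvStepB gap) ([], none) =
      (((pvRef gap t).map List.reverse).reverse, t.head?) := by
  induction t with
  | nil => simp [pvRef]
  | cons x u ih =>
    rw [List.reverse_cons, List.foldl_append, ih]
    cases u with
    | nil => simp [pvStepB, pvRef]
    | cons y u' =>
      obtain ⟨g, r, hgr⟩ : ∃ g r, pvRef gap (y :: u') = g :: r := by
        cases h : pvRef gap (y :: u') with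
        | nil => exact absurd h (pvRef_ne_nil gap y u')
        | cons g r => exact ⟨g, r, rfl⟩
    -- head? (y::u') = some y
      simp only [List.head?_cons]
      by_cases hc : y ≤ x + gap
      · simp only [List.foldl_cons, List.foldl_nil, pvStepB, if_pos hc, hgr,
          List.map_cons, List.reverse_cons]
        rw [List.dropLast_concat, PySem.List.pyGet?_neg_one_append_singleton]
        simp only [Option.getD_some, pvRef, if_pos hc, hgr]
        simp
      · simp only [List.foldl_cons, List.foldl_nil, pvStepB, if_neg hc, pvRef, hgr]
        simp

theorem pvB_eq_ref (xs : List Int) (gap : Int) :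
    group_structured_blocks_alt xs gap = pvRef gap xs := by
  unfold group_structured_blocks_alt
  rw [pvB_invariant]
  simp [List.map_map]

-- ===== A side =====
-- prepend cur to the first group
def pvConsInto (cur : List Int) : List (List Int) → List (List Int)
  | g :: r => (cur ++ g) :: r
  | [] => [cur]

def pvGlue (gap : Int) (cur : List Int) (prev : Int) : List Int → List (List Int)
  | [] => [cur]
  | x :: u => if x ≤ prev + gap then pvConsInto cur (pvRef gap (x :: u))
              else cur :: pvRef gap (x :: u)

theorem pvGlue_concat (gap : Int) (cur : List Int) (x : Int) (u : List Int) :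
    pvGlue gap (cur ++ [x]) x u = pvConsInto cur (pvRef gap (x :: u)) := by
  cases u with
  | nil => simp [pvGlue, pvRef, pvConsInto]
  | cons y u' =>
    obtain ⟨g, r, hgr⟩ : ∃ g r, pvRef gap (y :: u') = g :: r := by
      cases h : pvRef gap (y :: u') with
      | nil => exact absurd h (pvRef_ne_nil gap y u')
      | cons g r => exact ⟨g, r, rfl⟩
    by_cases hc : y ≤ x + gap
    · simp [pvGlue, pvRef, hgr, if_pos hc, pvConsInto]
    · simp [pvGlue, pvRef, hgr, if_neg hc, pvConsInto]

theorem pvGlue_single (gap x : Int) (u : List Int) :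
    pvGlue gap [x] x u = pvRef gap (x :: u) := by
  have h := pvGlue_concat gap [] x u
  simp only [List.nil_append] at h
  rw [h]
  obtain ⟨g, r, hgr⟩ : ∃ g r, pvRef gap (x :: u) = g :: r := by
    cases h' : pvRef gap (x :: u) with
    | nil => exact absurd h' (pvRef_ne_nil gap x u)
    | cons g r => exact ⟨g, r, rfl⟩
  simp [hgr, pvConsInto]

def pvStepA (gap : Int) (s : List (List Int) × List Int) (idx : Int) : List (List Int) × List Int :=
  if s.2 = [] ∨ idx ≤ (PySem.List.pyGet? s.2 (-1)).getD 0 + gap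
  then (s.1, s.2 ++ [idx])
  else (s.1 ++ [s.2], [idx])

def pvFlush (st : List (List Int) × List Int) : List (List Int) :=
  if st.2 = [] then st.1 else st.1 ++ [st.2]

theorem pvA_eq (xs : List Int) (gap : Int) :
    group_structured_blocks xs gap = pvFlush (xs.foldl (pvStepA gap) ([], [])) := rfl

theorem pvA_invariant (gap : Int) (t : List Int) :
    ∀ (bs : List (List Int)) (front : List Int) (prev : Int),
    pvFlush (t.foldl (pvStepA gap) (bs, front ++ [prev])) =
      bs ++ pvGlue gap (front ++ [prev]) prev t := by
  induction t with
  | nil =>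
    intro bs front prev
    simp [pvFlush, pvGlue]
  | cons x u ih =>
    intro bs front prev
    have hne : front ++ [prev] ≠ [] := by simp
    have hget : (PySem.List.pyGet? (front ++ [prev]) (-1)).getD 0 = prev := by
      rw [PySem.List.pyGet?_neg_one_append_singleton]; rfl
    by_cases hc : x ≤ prev + gap
    · have hstep : pvStepA gap (bs, front ++ [prev]) x = (bs, (front ++ [prev]) ++ [x]) := by
        simp [pvStepA, hc]
      rw [List.foldl_cons, hstep, ih bs (front ++ [prev]) x, pvGlue_concat]
      simp [pvGlue, hc]
    · have hstep : pvStepA gap (bs, front ++ [prev]) x = (bs ++ [front ++ [prev]], [x]) := by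
        simp [pvStepA, hc, hne]
      have h2 : ([x] : List Int) = [] ++ [x] := rfl
      rw [List.foldl_cons, hstep, h2, ih (bs ++ [front ++ [prev]]) [] x]
      simp only [List.nil_append]
      rw [pvGlue_single]
      simp [pvGlue, hc]

theorem pvA_eq_ref (xs : List Int) (gap : Int) :
    group_structured_blocks xs gap = pvRef gap xs := by
  cases xs with
  | nil => simp [group_structured_blocks, pvRef]
  | cons x t =>
    rw [pvA_eq, List.foldl_cons]
    have hstep : pvStepA gap ([], []) x = ([], [] ++ [x]) := by simp [pvStepA]
    rw [hstep, pvA_invariant gap t [] [] x]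
    simp only [List.nil_append]
    rw [pvGlue_single]

-- ===== VERDICT (by name: the statement is the Claim_ definition above) =====
theorem group_structured_blocks_spec : Claim_equal_group_structured_blocks := by
  intro xs gap _
  unfold Spec_group_structured_blocks
  rw [pvA_eq_ref, pvB_eq_ref]
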